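-- pv_equiv track=rewrite | github.com/openai/parameter-golf | HDC_Core_Model/Templates_Tools/grid_templates.py | mark_boundary_8connected
-- ===== SOURCE A (Python) =====
-- from typing import List, Dict, Tuple, Optional, Any, Callable
-- from copy import deepcopy
--
-- Grid = List[List[int]]
--
-- def mark_boundary_8connected(grid: Grid, boundary_color: int = 2, interior_color: int = None) -> Grid:
--     """
--     Mark boundary cells using 8-connectivity (includes diagonals).
--
--     A cell is boundary if it's on the grid edge or has any diagonal neighbor that's zero.
--     """
--     if not grid or not grid[0]:
--         return grid
--
--     height, width = len(grid), len(grid[0])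
--     result = deepcopy(grid)
--
--     # 8-connected neighbors (including diagonals)
--     neighbors_8 = [(-1, -1), (-1, 0), (-1, 1), (0, -1), (0, 1), (1, -1), (1, 0), (1, 1)]
--
--     for y in range(height):
--         for x in range(width):
--             if grid[y][x] != 0:
--                 is_boundary = False
--
--                 # Check if on edge
--                 if y == 0 or y == height - 1 or x == 0 or x == width - 1:
--                     is_boundary = True
--                 else:
--                     # Check 8-connected neighbors
--                     for dy, dx in neighbors_8:
--                         ny, nx = y + dy, x + dx
--                         if 0 <= ny < height and 0 <= nx < width:
--                             if grid[ny][nx] == 0: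
--                                 is_boundary = True
--                                 break
--
--                 if is_boundary:
--                     result[y][x] = boundary_color
--                 elif interior_color is not None:
--                     result[y][x] = interior_color
--
--     return result
-- ===== SOURCE B (Python) =====
-- from copy import deepcopy
--
-- def mark_boundary_8connected(grid, boundary_color=2, interior_color=None):
--     if not grid or not grid[0]:
--         return grid
--
--     height, width = len(grid), len(grid[0])
--
--     # Collect boundary coordinates first: every nonzero border cell, then every
--     # nonzero in-bounds neighbor of a zero cell (scatter from zeros).
--     boundary = set()
--     for y in range(height):
--         for x in range(width):
--             if grid[y][x] != 0 and (y == 0 or y == height - 1 or x == 0 or x == width - 1):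
--                 boundary.add((y, x))
--     for y in range(height):
--         for x in range(width):
--             if grid[y][x] == 0:
--                 for dy in (-1, 0, 1):
--                     for dx in (-1, 0, 1):
--                         ny, nx = y + dy, x + dx
--                         if 0 <= ny < height and 0 <= nx < width and grid[ny][nx] != 0:
--                             boundary.add((ny, nx))
--
--     # One assignment pass using the precomputed set.
--     result = deepcopy(grid)
--     for y in range(height):
--         for x in range(width):
--             if grid[y][x] != 0:
--                 if (y, x) in boundary:
--                     result[y][x] = boundary_color
--                 elif interior_color is not None:
--                     result[y][x] = interior_color
--     return result
-- ===== Notes on version B (the rewrite author's own statement) =====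
-- stated objective: alternative
-- what changed: Replaces A's per-cell 8-neighbor gather with a precomputed boundary coordinate set: one pass collects nonzero border cells, one pass scatters from each zero cell to its nonzero in-bounds 8-neighbors, and a final pass recolors nonzero cells by set membership.
import Mathlib
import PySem

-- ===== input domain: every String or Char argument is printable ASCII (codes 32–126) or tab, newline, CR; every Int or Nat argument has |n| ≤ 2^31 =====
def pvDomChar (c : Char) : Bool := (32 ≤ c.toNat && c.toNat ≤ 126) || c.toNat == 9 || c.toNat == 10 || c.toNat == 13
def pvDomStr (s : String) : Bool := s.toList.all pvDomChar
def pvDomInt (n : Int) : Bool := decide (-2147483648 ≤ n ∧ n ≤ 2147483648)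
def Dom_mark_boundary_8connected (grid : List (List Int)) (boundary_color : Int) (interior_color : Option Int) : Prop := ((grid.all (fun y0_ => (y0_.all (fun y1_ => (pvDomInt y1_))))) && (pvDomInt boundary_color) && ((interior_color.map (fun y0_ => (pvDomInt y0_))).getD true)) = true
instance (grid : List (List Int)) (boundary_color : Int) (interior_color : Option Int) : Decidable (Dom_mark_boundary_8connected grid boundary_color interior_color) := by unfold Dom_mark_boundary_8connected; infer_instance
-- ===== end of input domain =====

-- B replaces A's per-cell 8-neighbor gather by a boundary set built in two passes (nonzero
-- border cells, then a scatter from every zero cell to its nonzero in-bounds neighbors),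
-- followed by one recoloring pass by set membership (objective: alternative, not faster).

-- ===== PORT A =====
-- grid[y][x] read / result[y][x] = v write; indices are in range at every use site under
-- Pre_ (rows at least as long as row 0, y < height, x < width), where these are Python-exact.
def gget (g : List (List Int)) (y x : Nat) : Int := (g.getD y []).getD x 0
def gset (g : List (List Int)) (y x : Nat) (v : Int) : List (List Int) :=
  g.set y ((g.getD y []).set x v)

def neighbors8 : List (Int × Int) :=
  [(-1,-1), (-1,0), (-1,1), (0,-1), (0,1), (1,-1), (1,0), (1,1)]

-- A's is_boundary computation for the cell (y, x): edge test, else scan neighbors_8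
-- (any = the for-loop with break).
def bndA (g : List (List Int)) (h w y x : Nat) : Bool :=
  if y = 0 ∨ y = h - 1 ∨ x = 0 ∨ x = w - 1 then true
  else neighbors8.any (fun d =>
    decide (0 ≤ (y:Int)+d.1 ∧ (y:Int)+d.1 < (h:Int) ∧ 0 ≤ (x:Int)+d.2 ∧ (x:Int)+d.2 < (w:Int)) &&
    (gget g ((y:Int)+d.1).toNat ((x:Int)+d.2).toNat == 0))

def mark_boundary_8connected (grid : List (List Int)) (boundary_color : Int) (interior_color : Option Int) : List (List Int) :=
  if grid = [] ∨ grid.headD [] = [] then grid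
  else
    let height := grid.length
    let width := (grid.headD []).length
    (List.range height).foldl (fun result y =>
      (List.range width).foldl (fun result x =>
        if gget grid y x ≠ 0 then
          if bndA grid height width y x then gset result y x boundary_color
          else match interior_color with
            | some c => gset result y x c
            | none => result
        else result) result) grid

-- ===== PORT B =====
def offsets3 : List Int := [-1, 0, 1]

-- B's first pass: every nonzero border cell.
def edgeSet (g : List (List Int)) (h w : Nat) : PySem.Set (Nat × Nat) :=
  (List.range h).foldl (fun s y =>
    (List.range w).foldl (fun s x =>
      if gget g y x ≠ 0 ∧ (y = 0 ∨ y = h - 1 ∨ x = 0 ∨ x = w - 1)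
      then PySem.Set.add s (y, x) else s) s) PySem.Set.empty

-- B's second pass: from each zero cell, add its nonzero in-bounds 8-neighbors.
def scatter (g : List (List Int)) (h w : Nat) (s0 : PySem.Set (Nat × Nat)) : PySem.Set (Nat × Nat) :=
  (List.range h).foldl (fun s y =>
    (List.range w).foldl (fun s x =>
      if gget g y x = 0 then
        offsets3.foldl (fun s dy =>
          offsets3.foldl (fun s dx =>
            if 0 ≤ (y:Int)+dy ∧ (y:Int)+dy < (h:Int) ∧ 0 ≤ (x:Int)+dx ∧ (x:Int)+dx < (w:Int) ∧
               gget g ((y:Int)+dy).toNat ((x:Int)+dx).toNat ≠ 0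
            then PySem.Set.add s (((y:Int)+dy).toNat, ((x:Int)+dx).toNat) else s) s) s
      else s) s) s0

def mark_boundary_8connected_alt (grid : List (List Int)) (boundary_color : Int) (interior_color : Option Int) : List (List Int) :=
  if grid = [] ∨ grid.headD [] = [] then grid
  else
    let height := grid.length
    let width := (grid.headD []).length
    let boundary := scatter grid height width (edgeSet grid height width)
    (List.range height).foldl (fun result y =>
      (List.range width).foldl (fun result x =>
        if gget grid y x ≠ 0 then
          if PySem.Set.contains boundary (y, x) then gset result y x boundary_color
          else match interior_color with
            | some c => gset result y x c
            | none => result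
        else result) result) grid

-- ===== PRECONDITION & SPEC =====
-- Pre_ excludes ragged grids having a row shorter than row 0: both Pythons index every row
-- at all x < len(grid[0]) and raise IndexError on such a row.
def Pre_mark_boundary_8connected (grid : List (List Int)) (boundary_color : Int) (interior_color : Option Int) : Prop :=
  ∀ row ∈ grid, (grid.headD []).length ≤ row.length
instance (grid : List (List Int)) (boundary_color : Int) (interior_color : Option Int) : Decidable (Pre_mark_boundary_8connected grid boundary_color interior_color) := by unfold Pre_mark_boundary_8connected; infer_instance

def pvWitness_mark_boundary_8connected : List (List Int) × Int × Option Int :=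
  ([[1, 1, 1], [1, 1, 1], [1, 1, 1]], 9, some 7)

def Spec_mark_boundary_8connected (grid : List (List Int)) (boundary_color : Int) (interior_color : Option Int) (out : List (List Int)) : Prop := out = mark_boundary_8connected_alt grid boundary_color interior_color
instance (grid : List (List Int)) (boundary_color : Int) (interior_color : Option Int) (out : List (List Int)) : Decidable (Spec_mark_boundary_8connected grid boundary_color interior_color out) := by unfold Spec_mark_boundary_8connected; infer_instance

-- ===== CLAIM (what is proved, stated in full; the proofs are below) =====
def Claim_equal_mark_boundary_8connected : Prop := ∀ (grid : List (List Int)) (boundary_color : Int) (interior_color : Option Int), Dom_mark_boundary_8connected grid boundary_color interior_color → Pre_mark_boundary_8connected grid boundary_color interior_color → Spec_mark_boundary_8connected grid boundary_color interior_color (mark_boundary_8connected grid boundary_color interior_color)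

-- ===== LEMMAS AND PROOFS =====

-- Membership in a fold that accumulates set elements, given a membership law for each step.
lemma mem_foldl_iff {ι β : Type} [BEq β] [LawfulBEq β] (P : ι → β → Prop)
    (step : PySem.Set β → ι → PySem.Set β)
    (hstep : ∀ s i b, b ∈ step s i ↔ b ∈ s ∨ P i b) :
    ∀ (l : List ι) (s : PySem.Set β) (b : β),
      b ∈ l.foldl step s ↔ b ∈ s ∨ ∃ i ∈ l, P i b := by
  intro l
  induction l with
  | nil => simp
  | cons a l ih =>
    intro s b
    rw [List.foldl_cons, ih, hstep]
    simp only [List.mem_cons]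
    constructor
    · rintro ((h | h) | ⟨i, hi, h⟩)
      · exact Or.inl h
      · exact Or.inr ⟨a, Or.inl rfl, h⟩
      · exact Or.inr ⟨i, Or.inr hi, h⟩
    · rintro (h | ⟨i, (rfl | hi), h⟩)
      · exact Or.inl (Or.inl h)
      · exact Or.inl (Or.inr h)
      · exact Or.inr ⟨i, hi, h⟩

lemma mem_ite_add {β : Type} [BEq β] [LawfulBEq β] (s : PySem.Set β) (c : Prop) [Decidable c]
    (e b : β) : b ∈ (if c then PySem.Set.add s e else s) ↔ b ∈ s ∨ (c ∧ b = e) := by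
  split
  · rw [PySem.Set.mem_add]; tauto
  · tauto

-- What the edge pass collects.
def edgeP (g : List (List Int)) (h w : Nat) (p : Nat × Nat) : Prop :=
  ∃ y₀ ∈ List.range h, ∃ x₀ ∈ List.range w,
    (gget g y₀ x₀ ≠ 0 ∧ (y₀ = 0 ∨ y₀ = h - 1 ∨ x₀ = 0 ∨ x₀ = w - 1)) ∧ p = (y₀, x₀)

lemma mem_edgeSet (g : List (List Int)) (h w : Nat) (p : Nat × Nat) :
    p ∈ edgeSet g h w ↔ edgeP g h w p := by
  unfold edgeSet edgeP
  rw [mem_foldl_iff (P := fun y₀ p => ∃ x₀ ∈ List.range w,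
        (gget g y₀ x₀ ≠ 0 ∧ (y₀ = 0 ∨ y₀ = h - 1 ∨ x₀ = 0 ∨ x₀ = w - 1)) ∧ p = (y₀, x₀))]
  · simp [PySem.Set.empty]
  · intro s y₀ b
    rw [mem_foldl_iff (P := fun x₀ b =>
        (gget g y₀ x₀ ≠ 0 ∧ (y₀ = 0 ∨ y₀ = h - 1 ∨ x₀ = 0 ∨ x₀ = w - 1)) ∧ b = (y₀, x₀))]
    intro s x₀ b
    exact mem_ite_add s _ _ b

-- What the scatter pass adds.
def scatP (g : List (List Int)) (h w : Nat) (p : Nat × Nat) : Prop :=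
  ∃ y₀ ∈ List.range h, ∃ x₀ ∈ List.range w, gget g y₀ x₀ = 0 ∧
    ∃ dy ∈ offsets3, ∃ dx ∈ offsets3,
      (0 ≤ (y₀:Int)+dy ∧ (y₀:Int)+dy < (h:Int) ∧ 0 ≤ (x₀:Int)+dx ∧ (x₀:Int)+dx < (w:Int) ∧
        gget g ((y₀:Int)+dy).toNat ((x₀:Int)+dx).toNat ≠ 0) ∧
      p = (((y₀:Int)+dy).toNat, ((x₀:Int)+dx).toNat)

lemma mem_scatter (g : List (List Int)) (h w : Nat) (s0 : PySem.Set (Nat × Nat)) (p : Nat × Nat) :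
    p ∈ scatter g h w s0 ↔ p ∈ s0 ∨ scatP g h w p := by
  unfold scatter scatP
  rw [mem_foldl_iff (P := fun y₀ p => ∃ x₀ ∈ List.range w, gget g y₀ x₀ = 0 ∧
        ∃ dy ∈ offsets3, ∃ dx ∈ offsets3,
          (0 ≤ (y₀:Int)+dy ∧ (y₀:Int)+dy < (h:Int) ∧ 0 ≤ (x₀:Int)+dx ∧ (x₀:Int)+dx < (w:Int) ∧
            gget g ((y₀:Int)+dy).toNat ((x₀:Int)+dx).toNat ≠ 0) ∧
          p = (((y₀:Int)+dy).toNat, ((x₀:Int)+dx).toNat))]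
  intro s y₀ b
  rw [mem_foldl_iff (P := fun x₀ b => gget g y₀ x₀ = 0 ∧
        ∃ dy ∈ offsets3, ∃ dx ∈ offsets3,
          (0 ≤ (y₀:Int)+dy ∧ (y₀:Int)+dy < (h:Int) ∧ 0 ≤ (x₀:Int)+dx ∧ (x₀:Int)+dx < (w:Int) ∧
            gget g ((y₀:Int)+dy).toNat ((x₀:Int)+dx).toNat ≠ 0) ∧
          b = (((y₀:Int)+dy).toNat, ((x₀:Int)+dx).toNat))]
  intro s x₀ b
  split
  · next hz =>
    rw [mem_foldl_iff (P := fun dy b => ∃ dx ∈ offsets3,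
          (0 ≤ (y₀:Int)+dy ∧ (y₀:Int)+dy < (h:Int) ∧ 0 ≤ (x₀:Int)+dx ∧ (x₀:Int)+dx < (w:Int) ∧
            gget g ((y₀:Int)+dy).toNat ((x₀:Int)+dx).toNat ≠ 0) ∧
          b = (((y₀:Int)+dy).toNat, ((x₀:Int)+dx).toNat))]
    · simp [hz]
    · intro s dy b
      rw [mem_foldl_iff (P := fun dx b =>
          (0 ≤ (y₀:Int)+dy ∧ (y₀:Int)+dy < (h:Int) ∧ 0 ≤ (x₀:Int)+dx ∧ (x₀:Int)+dx < (w:Int) ∧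
            gget g ((y₀:Int)+dy).toNat ((x₀:Int)+dx).toNat ≠ 0) ∧
          b = (((y₀:Int)+dy).toNat, ((x₀:Int)+dx).toNat))]
      intro s dx b
      exact mem_ite_add s _ _ b
  · next hz => simp [hz]

lemma mem_neighbors8 (a b : Int) :
    (a, b) ∈ neighbors8 ↔ (a = -1 ∨ a = 0 ∨ a = 1) ∧ (b = -1 ∨ b = 0 ∨ b = 1) ∧ ¬(a = 0 ∧ b = 0) := by
  simp [neighbors8, Prod.mk.injEq]
  omega

lemma mem_offsets3 (a : Int) : a ∈ offsets3 ↔ a = -1 ∨ a = 0 ∨ a = 1 := by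
  simp [offsets3]

-- Core correspondence: for a nonzero in-range cell, membership in B's boundary set equals
-- A's is_boundary verdict.
lemma contains_boundary_eq_bndA (g : List (List Int)) (h w y x : Nat)
    (hy : y < h) (hx : x < w) (hnz : gget g y x ≠ 0) :
    PySem.Set.contains (scatter g h w (edgeSet g h w)) (y, x) = bndA g h w y x := by
  rw [Bool.eq_iff_iff, PySem.Set.contains_iff, mem_scatter, mem_edgeSet]
  unfold bndA
  split
  · next he =>
    constructor
    · intro _; rfl
    · intro _
      exact Or.inl ⟨y, by simpa using hy, x, by simpa using hx, ⟨hnz, he⟩, rfl⟩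
  · next he =>
    simp only [List.any_eq_true]
    constructor
    · rintro (⟨y₀, _, x₀, _, ⟨_, hedge⟩, hp⟩ | hsc)
      · exact absurd (by cases hp; exact hedge) he
      · obtain ⟨y₀, hy₀, x₀, hx₀, hz, dy, hdy, dx, hdx, ⟨h1, h2, h3, h4, _⟩, hp⟩ := hsc
        rw [List.mem_range] at hy₀ hx₀
        rw [mem_offsets3] at hdy hdx
        obtain ⟨hpy, hpx⟩ := Prod.mk.injEq .. ▸ hp
        have hyy : (y : Int) = (y₀ : Int) + dy := by omega
        have hxx : (x : Int) = (x₀ : Int) + dx := by omega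
        refine ⟨(-dy, -dx), ?_, ?_⟩
        · rw [mem_neighbors8]
          refine ⟨by omega, by omega, ?_⟩
          rintro ⟨hdy0, hdx0⟩
          have : y = y₀ ∧ x = x₀ := by omega
          exact hnz (this.1 ▸ this.2 ▸ hz)
        · have e1 : ((y:Int) + -dy).toNat = y₀ := by omega
          have e2 : ((x:Int) + -dx).toNat = x₀ := by omega
          simp only [e1, e2, Bool.and_eq_true, decide_eq_true_eq, beq_iff_eq]
          exact ⟨⟨by omega, by omega, by omega, by omega⟩, hz⟩
    · rintro ⟨⟨dy, dx⟩, hd, hpred⟩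
      rw [mem_neighbors8] at hd
      simp only [Bool.and_eq_true, decide_eq_true_eq, beq_iff_eq] at hpred
      obtain ⟨⟨b1, b2, b3, b4⟩, hz⟩ := hpred
      refine Or.inr ⟨((y:Int)+dy).toNat, by simp [List.mem_range]; omega,
        ((x:Int)+dx).toNat, by simp [List.mem_range]; omega, hz, -dy, ?_, -dx, ?_, ?_, ?_⟩
      · rw [mem_offsets3]; omega
      · rw [mem_offsets3]; omega
      · have e1 : ((((y:Int)+dy).toNat : Int) + -dy) = (y : Int) := by omega
        have e2 : ((((x:Int)+dx).toNat : Int) + -dx) = (x : Int) := by omega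
        rw [e1, e2]
        refine ⟨by omega, by omega, by omega, by omega, ?_⟩
        simpa using hnz
      · have e1 : ((((y:Int)+dy).toNat : Int) + -dy).toNat = y := by omega
        have e2 : ((((x:Int)+dx).toNat : Int) + -dx).toNat = x := by omega
        rw [e1, e2]

-- ===== VERDICT (by name: the statement is the Claim_ definition above) =====
theorem mark_boundary_8connected_spec : Claim_equal_mark_boundary_8connected := by
  intro grid bc ic _ _
  unfold Spec_mark_boundary_8connected mark_boundary_8connected mark_boundary_8connected_alt
  split
  · rfl
  · apply List.foldl_ext
    intro res y hy
    apply List.foldl_ext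
    intro r x hx
    rw [List.mem_range] at hy hx
    by_cases hz : gget grid y x ≠ 0
    · rw [if_pos hz, if_pos hz, contains_boundary_eq_bndA grid _ _ y x hy hx hz]
    · rw [if_neg hz, if_neg hz]
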